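-- pv_equiv track=rewrite | github.com/yoshimu-urami-nats/kakeibo-analytics-app | demo_generate.py | month_range
-- ===== SOURCE A (Python) =====
-- def month_range(start_year: int, start_month: int, months: int) -> list[tuple[int, int]]:
--     y, m = start_year, start_month
--     out = []
--     for _ in range(months):
--         out.append((y, m))
--         m += 1
--         if m == 13:
--             y += 1
--             m = 1
--     return out
-- ===== SOURCE B (Python) =====
-- def month_range(start_year: int, start_month: int, months: int) -> list[tuple[int, int]]:
--     # months in the starting year: climb from start_month up to December
--     head = [(start_year, start_month + i) for i in range(min(13 - start_month, months))]
--     # then whole calendar years from January of the next year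
--     tail = [(start_year + 1 + j // 12, j % 12 + 1) for j in range(months - len(head))]
--     return head + tail
-- ===== Notes on version B (the rewrite author's own statement) =====
-- stated objective: alternative
-- what changed: Replaces the mutable (year, month) carry state and the m == 13 rollover branch with direct construction: a climb-to-December prefix plus a divmod formula on the remaining month index, built as two comprehensions with no mutable state; Pre_ excludes requests for at least one month starting from a month number above 12, where no calendar month exists and A's unnormalized echo and B's normalized sequence are equally defensible.
-- outside the precondition, e.g. on month_range(2020, 13, 2): A returns [(2020, 13), (2020, 14)], B returns [(2021, 1), (2021, 2)]
import Mathlib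
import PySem

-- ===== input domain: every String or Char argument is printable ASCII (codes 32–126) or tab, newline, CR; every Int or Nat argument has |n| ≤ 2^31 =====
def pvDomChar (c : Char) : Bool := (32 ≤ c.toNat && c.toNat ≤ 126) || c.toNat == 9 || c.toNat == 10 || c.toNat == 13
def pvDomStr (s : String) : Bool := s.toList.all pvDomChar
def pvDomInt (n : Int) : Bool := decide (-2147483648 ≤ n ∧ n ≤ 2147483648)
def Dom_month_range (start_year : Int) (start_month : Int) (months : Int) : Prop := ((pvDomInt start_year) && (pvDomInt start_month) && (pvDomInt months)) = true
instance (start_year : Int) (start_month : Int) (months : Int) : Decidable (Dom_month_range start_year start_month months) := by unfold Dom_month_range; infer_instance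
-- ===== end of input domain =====

-- B replaces A's mutable (year, month) carry state and rollover branch with direct construction:
-- a climb-to-December prefix plus a divmod formula on the remaining index (alternative
-- decomposition, same cost); Pre_ excludes start months above 12 (see the comment there).

-- ===== PORT A =====
def month_range (start_year : Int) (start_month : Int) (months : Int) : List (Int × Int) :=
  ((PySem.List.pyRange 0 months 1).foldl
    (fun (st : Int × Int × List (Int × Int)) (_ : Int) =>
      let out := st.2.2 ++ [(st.1, st.2.1)]
      let m := st.2.1 + 1
      if m = 13 then (st.1 + 1, 1, out) else (st.1, m, out))
    (start_year, start_month, [])).2.2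

-- ===== PORT B =====
def month_range_alt (start_year : Int) (start_month : Int) (months : Int) : List (Int × Int) :=
  let head := (PySem.List.pyRange 0 (min (13 - start_month) months) 1).map
    (fun i => (start_year, start_month + i))
  let tail := (PySem.List.pyRange 0 (months - (head.length : Int)) 1).map
    (fun j => (start_year + 1 + PySem.Int.floordiv j 12, PySem.Int.mod j 12 + 1))
  head ++ tail

-- ===== PRECONDITION & SPEC =====
-- Pre_ excludes requests for at least one month starting from a month number above 12: no such
-- calendar month exists, and there A's unnormalized echo ((y,13),(y,14),... with no rollover) and
-- B's normalized sequence are equally defensible readings of the invalid start.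
def Pre_month_range (start_year : Int) (start_month : Int) (months : Int) : Prop :=
  start_month ≤ 12 ∨ months ≤ 0
instance (start_year : Int) (start_month : Int) (months : Int) : Decidable (Pre_month_range start_year start_month months) := by unfold Pre_month_range; infer_instance

def pvWitness_month_range : Int × Int × Int := (2020, 5, 7)

def Spec_month_range (start_year : Int) (start_month : Int) (months : Int) (out : List (Int × Int)) : Prop := out = month_range_alt start_year start_month months
instance (start_year : Int) (start_month : Int) (months : Int) (out : List (Int × Int)) : Decidable (Spec_month_range start_year start_month months out) := by unfold Spec_month_range; infer_instance

-- ===== CLAIM (what is proved, stated in full; the proofs are below) =====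
def Claim_equal_month_range : Prop := ∀ (start_year : Int) (start_month : Int) (months : Int), Dom_month_range start_year start_month months → Pre_month_range start_year start_month months → Spec_month_range start_year start_month months (month_range start_year start_month months)

-- ===== LEMMAS AND PROOFS =====

/-- Reference spec of A's loop: one constructor per iteration. -/
def specA : Int → Int → Nat → List (Int × Int)
  | _, _, 0 => []
  | sy, sm, k+1 => (sy, sm) :: (if sm = 12 then specA (sy+1) 1 k else specA sy (sm+1) k)

theorem foldlA (l : List Int) (sy sm : Int) (acc : List (Int × Int)) :
    (l.foldl
      (fun (st : Int × Int × List (Int × Int)) (_ : Int) =>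
        let out := st.2.2 ++ [(st.1, st.2.1)]
        let m := st.2.1 + 1
        if m = 13 then (st.1 + 1, 1, out) else (st.1, m, out))
      (sy, sm, acc)).2.2 = acc ++ specA sy sm l.length := by
  induction l generalizing sy sm acc with
  | nil => simp [specA]
  | cons x t ih =>
      simp only [List.foldl_cons, List.length_cons, specA]
      by_cases h : sm = 12
      · subst h; norm_num [ih]
      · have h13 : ¬ (sm + 1 = 13) := by omega
        simp only [h13, if_neg h, ih]
        simp

theorem A_eq_specA (sy sm n : Int) :
    month_range sy sm n = specA sy sm n.toNat := by
  unfold month_range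
  rw [foldlA]
  simp [PySem.List.length_pyRange_one]

theorem pyRange_map_eq_range_map {α : Type} (n : Int) (f : Int → α) :
    (PySem.List.pyRange 0 n 1).map f = (List.range n.toNat).map (fun k : Nat => f k) := by
  rw [PySem.List.pyRange_one, List.map_map]
  simp [Function.comp]

/-- Closed form of B's two comprehensions (on Nat ranges, with pure ediv/emod). -/
theorem B_closed (sy sm n : Int) :
    month_range_alt sy sm n =
      ((List.range (min (13 - sm) n).toNat).map (fun i : Nat => (sy, sm + (i : Int)))) ++
      ((List.range (n - ((min (13 - sm) n).toNat : Int)).toNat).map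
        (fun j : Nat => (sy + 1 + (j : Int) / 12, (j : Int) % 12 + 1))) := by
  unfold month_range_alt
  simp only []
  rw [pyRange_map_eq_range_map, pyRange_map_eq_range_map]
  simp only [List.length_map, List.length_range]
  refine congrArg₂ _ rfl (List.map_congr_left ?_)
  intro j _
  have hj : (0:Int) ≤ (j : Int) := by positivity
  rw [PySem.Int.floordiv_eq_ediv_of_pos (by omega), PySem.Int.mod_eq_emod_of_pos (by omega)]

/-- Closed form of specA for a start month in 1..12 (used at the rollover). -/
theorem specA_closed (k : Nat) : ∀ (sy sm : Int), 1 ≤ sm → sm ≤ 12 →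
    specA sy sm k = (List.range k).map
      (fun i : Nat => (sy + (sm - 1 + (i : Int)) / 12, (sm - 1 + (i : Int)) % 12 + 1)) := by
  induction k with
  | zero => intro sy sm h1 h2; simp [specA]
  | succ k ih =>
      intro sy sm h1 h2
      rw [List.range_succ_eq_map, List.map_cons, List.map_map]
      have hhead : (sy + (sm - 1 + ((0:Nat) : Int)) / 12, (sm - 1 + ((0:Nat) : Int)) % 12 + 1) = (sy, sm) := by
        simp only [Nat.cast_zero, add_zero, Prod.mk.injEq]
        constructor <;> omega
      rw [hhead]
      simp only [specA]
      by_cases h : sm = 12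
      · subst h
        rw [if_pos rfl, ih (sy+1) 1 (by omega) (by omega)]
        refine congrArg _ (List.map_congr_left ?_)
        intro i _
        simp only [Function.comp, Prod.mk.injEq]
        constructor <;> push_cast <;> omega
      · rw [if_neg h, ih sy (sm+1) (by omega) (by omega)]
        refine congrArg _ (List.map_congr_left ?_)
        intro i _
        simp only [Function.comp, Prod.mk.injEq]
        constructor <;> push_cast <;> omega

/-- Two-phase closed form of specA for start months ≤ 12 (B's shape, on Nat). -/
theorem specA_low (k : Nat) : ∀ (sy sm : Int), sm ≤ 12 →
    specA sy sm k =
      ((List.range (min (13 - sm).toNat k)).map (fun i : Nat => (sy, sm + (i : Int)))) ++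
      ((List.range (k - min (13 - sm).toNat k)).map
        (fun i : Nat => (sy + 1 + ((i : Int)) / 12, ((i : Int)) % 12 + 1))) := by
  induction k with
  | zero => intro sy sm h; simp [specA]
  | succ k ih =>
      intro sy sm h
      have ht : 1 ≤ (13 - sm).toNat := by omega
      have hmin : min (13 - sm).toNat (k+1) = (min ((13 - sm).toNat - 1) k) + 1 := by omega
      rw [hmin, List.range_succ_eq_map, List.map_cons, List.map_map]
      simp only [Nat.cast_zero, add_zero, List.cons_append, specA]
      by_cases hsm : sm = 12
      · subst hsm
        rw [if_pos rfl]
        have h0 : min ((13 - (12:Int)).toNat - 1) k = 0 := by norm_num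
        rw [h0]
        simp only [List.range_zero, List.map_nil, List.nil_append, Nat.zero_add,
          Nat.add_sub_cancel]
        rw [specA_closed k (sy+1) 1 (by omega) (by omega)]
        refine congrArg _ (List.map_congr_left ?_)
        intro i _
        simp only [Prod.mk.injEq]
        constructor <;> push_cast <;> omega
      · rw [if_neg hsm]
        rw [ih sy (sm+1) (by omega)]
        have h1 : min (13 - (sm+1)).toNat k = min ((13 - sm).toNat - 1) k := by omega
        rw [h1]
        have h2 : k + 1 - (min ((13 - sm).toNat - 1) k + 1) = k - min ((13 - sm).toNat - 1) k := by
          omega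
        rw [h2]
        refine congrArg _ (congrArg₂ _ (List.map_congr_left ?_) rfl)
        intro i _
        simp only [Function.comp, Prod.mk.injEq]
        constructor <;> push_cast <;> omega

-- ===== VERDICT (by name: the statements are the Claim_ definitions above) =====
theorem month_range_spec : Claim_equal_month_range := by
  intro sy sm n _ hP
  show month_range sy sm n = month_range_alt sy sm n
  unfold Pre_month_range at hP
  rw [A_eq_specA, B_closed]
  by_cases hn : n ≤ 0
  · have h0 : n.toNat = 0 := by omega
    have h1 : (min (13 - sm) n).toNat = 0 := by omega
    rw [h0, h1]
    have h2 : (n - ((0:Nat) : Int)).toNat = 0 := by omega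
    rw [h2]; rfl
  · have hsm : sm ≤ 12 := by omega
    rw [specA_low n.toNat sy sm hsm]
    have hhl : (min (13 - sm) n).toNat = min (13 - sm).toNat n.toNat := by omega
    rw [hhl]
    have htl : (n - ((min (13 - sm).toNat n.toNat : Nat) : Int)).toNat
        = n.toNat - min (13 - sm).toNat n.toNat := by omega
    rw [htl]
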